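-- pv_equiv track=rewrite | github.com/donghyun-chae/mit-6006 | Lecture11/donghyun/wsp.py | dfs
-- ===== SOURCE A (Python) =====
-- def dfs(s, Adj, parent=None, order=None):
--     if parent is None:
--         parent = dict()
--         for v in Adj:
--             parent[v] = None
--         parent[s] = s
--         order = []
--
--     for v in Adj[s].keys():
--          if parent[v] is None:
--             parent[v] = s
--             dfs(v, Adj, parent, order)
--     order.append(s)
--     return order
-- ===== SOURCE B (Python) =====
-- _DONE = object()
--
--
-- def dfs(s, Adj, parent=None, order=None):
--     if parent is None:
--         parent = dict.fromkeys(Adj)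
--         parent[s] = s
--         order = []
--     stack = [(s, iter(Adj[s].keys()))]
--     while stack:
--         u, it = stack[-1]
--         v = next(it, _DONE)
--         if v is _DONE:
--             stack.pop()
--             order.append(u)
--         elif parent[v] is None:
--             parent[v] = u
--             stack.append((v, iter(Adj[v].keys())))
--     return order
-- ===== Notes on version B (the rewrite author's own statement) =====
-- stated objective: alternative
-- what changed: A's recursive DFS is re-decomposed into an iterative while-loop over an explicit stack of (node, neighbor-iterator) frames: a frame's node is appended to the postorder only when its iterator is exhausted, so the exact postorder and parent updates of the recursion are reproduced without any recursion (and without Python's recursion-depth limit on deep graphs).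
import Mathlib
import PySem

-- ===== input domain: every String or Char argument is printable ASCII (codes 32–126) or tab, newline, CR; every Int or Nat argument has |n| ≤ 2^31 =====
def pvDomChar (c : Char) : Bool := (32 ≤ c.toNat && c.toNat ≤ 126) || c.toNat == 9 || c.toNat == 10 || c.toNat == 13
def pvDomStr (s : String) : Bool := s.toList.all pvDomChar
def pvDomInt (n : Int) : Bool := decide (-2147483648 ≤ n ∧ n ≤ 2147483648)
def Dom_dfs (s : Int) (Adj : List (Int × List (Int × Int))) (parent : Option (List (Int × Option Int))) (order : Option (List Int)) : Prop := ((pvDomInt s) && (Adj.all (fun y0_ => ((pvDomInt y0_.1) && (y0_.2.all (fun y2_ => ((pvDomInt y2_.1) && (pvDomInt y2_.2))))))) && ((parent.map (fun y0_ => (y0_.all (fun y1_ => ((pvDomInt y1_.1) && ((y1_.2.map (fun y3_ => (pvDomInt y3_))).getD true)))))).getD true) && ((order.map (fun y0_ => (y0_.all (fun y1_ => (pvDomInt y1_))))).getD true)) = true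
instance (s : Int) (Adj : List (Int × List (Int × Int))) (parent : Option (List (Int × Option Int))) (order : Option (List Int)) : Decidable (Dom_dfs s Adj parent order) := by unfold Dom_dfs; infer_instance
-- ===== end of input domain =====

-- B rewrites A's recursive DFS postorder as an iterative stack machine (one frame per
-- node with its remaining-neighbor iterator); both Pythons also mutate the caller's
-- `parent`/`order` arguments in place the same way — the theorems are about the return value.

-- Shared helpers (these are the same Python lines in A and in B):
-- number of keys of `parent` currently mapped to None (a termination/fuel device only)
def pvNoneCount (d : PySem.Dict Int (Option Int)) : Nat :=
  d.items.countP (fun p => p.2 == none)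

-- replacing the value at a matched key by `some u` never adds a None value
theorem pvCountMapLe (k u : Int) (l : List (Int × Option Int)) :
    (l.map (fun p => if p.1 == k then (k, some u) else p)).countP (fun p => p.2 == none) ≤
      l.countP (fun p => p.2 == none) := by
  rw [List.countP_map]
  apply List.countP_mono_left
  intro a _ h
  by_cases hp : a.1 == k <;> simp_all

-- overwriting the first matched entry (whose value is None) with `some u` strictly shrinks it
theorem pvCountMapLt (k u : Int) (l : List (Int × Option Int)) (q : Int × Option Int)
    (hq : l.find? (fun p => p.1 == k) = some q) (hq2 : q.2 = none) :
    (l.map (fun p => if p.1 == k then (k, some u) else p)).countP (fun p => p.2 == none) <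
      l.countP (fun p => p.2 == none) := by
  induction l with
  | nil => simp at hq
  | cons p l ih =>
    by_cases hp : p.1 == k
    · simp only [List.find?_cons, hp] at hq
      obtain rfl : p = q := by simpa using hq
      have := pvCountMapLe k u l
      simp only [List.map_cons, hp, if_pos, List.countP_cons, hq2]
      simp only [show (((k, some u) : Int × Option Int).2 == none) = false from rfl,
        show ((none : Option Int) == none) = true from rfl, if_pos, if_neg,
        Bool.false_eq_true, not_false_iff]
      omega
    · simp only [List.find?_cons, hp] at hq
      have := ih hq
      simp only [List.map_cons, hp, if_neg, Bool.false_eq_true, not_false_iff,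
        List.countP_cons]
      omega

-- `parent[v] = u` where `parent[v] is None` held strictly decreases pvNoneCount
theorem pvNcInsertLt (d : PySem.Dict Int (Option Int)) (k u : Int)
    (h : d.get? k = some none) :
    pvNoneCount (d.insert k (some u)) < pvNoneCount d := by
  obtain ⟨q, hq, hq2⟩ : ∃ q, d.items.find? (fun p => p.1 == k) = some q ∧ q.2 = none := by
    simp only [PySem.Dict.get?, Option.map_eq_some_iff] at h
    obtain ⟨q, hq, hq2⟩ := h
    exact ⟨q, hq, hq2⟩
  have hcont : d.contains k = true := by
    simp only [PySem.Dict.contains, List.any_eq_true]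
    exact ⟨q, List.mem_of_find?_eq_some hq, List.find?_eq_some_iff_append.mp hq |>.1⟩
  unfold pvNoneCount
  simp only [PySem.Dict.insert, hcont, if_pos]
  exact pvCountMapLt k u d.items q hq hq2

-- `Adj[u].keys()` (empty list exactly where Python raises KeyError; Pre_ excludes that)
def pvNbrs (Adj : List (Int × List (Int × Int))) (u : Int) : List Int :=
  match (PySem.Dict.ofList Adj).get? u with
  | some l => (PySem.Dict.ofList l).keys
  | none => []

-- the shared `if parent is None:` initialisation block
def pvInit (s : Int) (Adj : List (Int × List (Int × Int)))
    (parent : Option (List (Int × Option Int))) (order : Option (List Int)) :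
    PySem.Dict Int (Option Int) × List Int :=
  match parent with
  | none =>
      (((PySem.Dict.ofList Adj).keys.foldl (fun d v => d.insert v none)
          PySem.Dict.empty).insert s (some s), [])
  | some pl => (PySem.Dict.ofList pl, order.getD [])

-- ===== PORT A =====
-- A's recursive call `dfs(v, Adj, parent, order)` is pvVisitA (the body after the init),
-- and pvForA is A's `for v in Adj[s].keys():` loop; the fuel argument (kept above
-- pvNoneCount of the state, which bounds the recursion depth) only makes the
-- mutual recursion structural.
mutual
def pvForA (Adj : List (Int × List (Int × Int))) :
    Nat → Int → List Int → PySem.Dict Int (Option Int) × List Int →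
    PySem.Dict Int (Option Int) × List Int
  | _, _, [], st => st
  | f, u, v :: vs, st =>
    if st.1.get? v = some none then
      pvForA Adj f u vs (pvVisitA Adj f v (st.1.insert v (some u), st.2))
    else
      pvForA Adj f u vs st
termination_by f _ vs _ => (f, vs.length + 1)

def pvVisitA (Adj : List (Int × List (Int × Int))) :
    Nat → Int → PySem.Dict Int (Option Int) × List Int →
    PySem.Dict Int (Option Int) × List Int
  | 0, _, st => st
  | f + 1, u, st =>
    let st' := pvForA Adj f u (pvNbrs Adj u) st
    (st'.1, st'.2 ++ [u])
termination_by f _ _ => (f, 0)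
end

def dfs (s : Int) (Adj : List (Int × List (Int × Int))) (parent : Option (List (Int × Option Int))) (order : Option (List Int)) : List Int :=
  let st := pvInit s Adj parent order
  (pvVisitA Adj (pvNoneCount st.1 + 2) s st).2

-- ===== PORT B =====
-- B's `while stack:` loop: each frame is (node, neighbors its iterator has not yielded yet);
-- exhausted frame → pop and append the node, else advance the iterator and maybe push.
def pvLoopB (Adj : List (Int × List (Int × Int)))
    (p : PySem.Dict Int (Option Int)) (o : List Int)
    (stack : List (Int × List Int)) : List Int :=
  match stack with
  | [] => o
  | (u, []) :: rest => pvLoopB Adj p (o ++ [u]) rest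
  | (u, v :: vs) :: rest =>
    if p.get? v = some none then
      pvLoopB Adj (p.insert v (some u)) o ((v, pvNbrs Adj v) :: (u, vs) :: rest)
    else
      pvLoopB Adj p o ((u, vs) :: rest)
termination_by (pvNoneCount p, stack.foldr (fun fr a => fr.2.length + 1 + a) 0)
decreasing_by
  all_goals first
    | exact Prod.Lex.left _ _ (pvNcInsertLt p v u (by assumption))
    | (apply Prod.Lex.right; simp)

def dfs_alt (s : Int) (Adj : List (Int × List (Int × Int))) (parent : Option (List (Int × Option Int))) (order : Option (List Int)) : List Int :=
  let st := pvInit s Adj parent order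
  pvLoopB Adj st.1 st.2 [(s, pvNbrs Adj s)]

-- ===== PRECONDITION & SPEC =====
-- Pre_dfs holds exactly where A returns: it excludes the inputs on which A raises —
-- KeyError when s is missing from Adj, or when a neighbor of a node the walk visits is
-- missing from parent's keys, or an entered node is missing from Adj, and AttributeError
-- when parent is given but order is None.  The visited set is stated as a graph-reachability
-- closure of the input (which nodes are enterable is read off the initial parent argument),
-- not by running either port.

-- `parent[v] is None` read off the INPUT, i.e. whether A's walk may enter v
def pvEnter (Adj : List (Int × List (Int × Int))) (s : Int)
    (parent : Option (List (Int × Option Int))) (v : Int) : Bool :=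
  match parent with
  | none => v != s && (PySem.Dict.ofList Adj).contains v
  | some pl => (PySem.Dict.ofList pl).get? v == some none

-- one closure step: add the enterable neighbors of already-reached nodes
def pvStepR (Adj : List (Int × List (Int × Int))) (s : Int)
    (parent : Option (List (Int × Option Int))) (V : List Int) : List Int :=
  V ++ (V.flatMap (pvNbrs Adj)).filter (fun v => pvEnter Adj s parent v && !V.contains v)

-- the set of nodes A's walk visits (closure reached within #keys iterations)
def pvReach (Adj : List (Int × List (Int × Int))) (s : Int)
    (parent : Option (List (Int × Option Int))) : List Int :=
  (pvStepR Adj s parent)^[Adj.length + (match parent with | none => 0 | some pl => pl.length) + 1] [s]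

def pvPreB (s : Int) (Adj : List (Int × List (Int × Int)))
    (parent : Option (List (Int × Option Int))) (order : Option (List Int)) : Bool :=
  (PySem.Dict.ofList Adj).contains s &&
  (match parent with | none => true | some _ => order.isSome) &&
  (pvReach Adj s parent).all (fun u =>
    (pvNbrs Adj u).all (fun v =>
      (match parent with
       | none => (PySem.Dict.ofList Adj).contains v || v == s
       | some pl => (pl.map Prod.fst).contains v) &&
      (!(pvEnter Adj s parent v) || (PySem.Dict.ofList Adj).contains v)))

def Pre_dfs (s : Int) (Adj : List (Int × List (Int × Int))) (parent : Option (List (Int × Option Int))) (order : Option (List Int)) : Prop :=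
  pvPreB s Adj parent order = true

instance (s : Int) (Adj : List (Int × List (Int × Int))) (parent : Option (List (Int × Option Int))) (order : Option (List Int)) : Decidable (Pre_dfs s Adj parent order) := by
  unfold Pre_dfs; infer_instance

def pvWitness_dfs : Int × (List (Int × List (Int × Int))) × (Option (List (Int × Option Int))) × Option (List Int) :=
  (0, [(0, [(1, 7)]), (1, [])], none, none)

def Spec_dfs (s : Int) (Adj : List (Int × List (Int × Int))) (parent : Option (List (Int × Option Int))) (order : Option (List Int)) (out : List Int) : Prop := out = dfs_alt s Adj parent order
instance (s : Int) (Adj : List (Int × List (Int × Int))) (parent : Option (List (Int × Option Int))) (order : Option (List Int)) (out : List Int) : Decidable (Spec_dfs s Adj parent order out) := by unfold Spec_dfs; infer_instance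

-- ===== CLAIM (what is proved, stated in full; the proofs are below) =====
def Claim_equal_dfs : Prop := ∀ (s : Int) (Adj : List (Int × List (Int × Int))) (parent : Option (List (Int × Option Int))) (order : Option (List Int)), Dom_dfs s Adj parent order → Pre_dfs s Adj parent order → Spec_dfs s Adj parent order (dfs s Adj parent order)

-- ===== LEMMAS AND PROOFS =====

theorem pvNcInsertLe (d : PySem.Dict Int (Option Int)) (k u : Int) :
    pvNoneCount (d.insert k (some u)) ≤ pvNoneCount d := by
  unfold pvNoneCount
  simp only [PySem.Dict.insert]
  split
  · exact pvCountMapLe k u d.items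
  · simp [List.countP_append]

theorem pvNcPos (d : PySem.Dict Int (Option Int)) (k : Int)
    (h : d.get? k = some none) : 1 ≤ pvNoneCount d := by
  obtain ⟨q, hq, hq2⟩ : ∃ q, d.items.find? (fun p => p.1 == k) = some q ∧ q.2 = none := by
    simp only [PySem.Dict.get?, Option.map_eq_some_iff] at h
    obtain ⟨q, hq, hq2⟩ := h
    exact ⟨q, hq, hq2⟩
  unfold pvNoneCount
  rw [Nat.succ_le_iff, List.countP_pos_iff]
  exact ⟨q, List.mem_of_find?_eq_some hq, by simp [hq2]⟩

theorem pvNcForALe (Adj : List (Int × List (Int × Int))) (f : Nat)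
    (hQ : ∀ u st, pvNoneCount (pvVisitA Adj f u st).1 ≤ pvNoneCount st.1) :
    ∀ (u : Int) (vs : List Int) st, pvNoneCount (pvForA Adj f u vs st).1 ≤ pvNoneCount st.1 := by
  intro u vs
  induction vs with
  | nil => intro st; rw [pvForA]
  | cons v vs ih =>
    intro st
    by_cases hc : st.1.get? v = some none
    · rw [pvForA, if_pos hc]
      calc pvNoneCount (pvForA Adj f u vs (pvVisitA Adj f v (st.1.insert v (some u), st.2))).1
          ≤ pvNoneCount (pvVisitA Adj f v (st.1.insert v (some u), st.2)).1 := ih _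
        _ ≤ pvNoneCount ((st.1.insert v (some u), st.2) : _ × List Int).1 := hQ _ _
        _ ≤ pvNoneCount st.1 := pvNcInsertLe _ _ _
    · rw [pvForA, if_neg hc]; exact ih st

theorem pvNcVisitALe (Adj : List (Int × List (Int × Int))) :
    ∀ (f : Nat) (u : Int) st, pvNoneCount (pvVisitA Adj f u st).1 ≤ pvNoneCount st.1 := by
  intro f
  induction f with
  | zero => intro u st; rw [pvVisitA]
  | succ f ih =>
    intro u st
    rw [pvVisitA]
    exact pvNcForALe Adj f ih u _ st

-- the simulation: B's machine on a frame (u, vs) over any lower stack is A's neighbor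
-- loop on vs from the same state, then the append of u, then the rest of the stack
theorem pvSim (Adj : List (Int × List (Int × Int))) :
    ∀ (f : Nat) (vs : List Int) (u : Int)
      (st : PySem.Dict Int (Option Int) × List Int) (rest : List (Int × List Int)),
      pvNoneCount st.1 < f →
      pvLoopB Adj st.1 st.2 ((u, vs) :: rest) =
        pvLoopB Adj (pvForA Adj f u vs st).1 ((pvForA Adj f u vs st).2 ++ [u]) rest := by
  intro f
  induction f with
  | zero => intro vs u st rest h; omega
  | succ f ihf =>
    intro vs u
    induction vs with
    | nil =>
      intro st rest _
      rw [pvLoopB, pvForA]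
    | cons v vs ih =>
      intro st rest h
      by_cases hc : st.1.get? v = some none
      · have hlt := pvNcInsertLt st.1 v u hc
        have hpos := pvNcPos st.1 v hc
        rw [pvLoopB, if_pos hc]
        rw [ihf (pvNbrs Adj v) v (st.1.insert v (some u), st.2) ((u, vs) :: rest)
          (show pvNoneCount (st.1.insert v (some u)) < f by omega)]
        have hq : pvNoneCount (pvForA Adj f v (pvNbrs Adj v) (st.1.insert v (some u), st.2)).1
            < f + 1 := by
          have h2 := pvNcForALe Adj f (pvNcVisitALe Adj f) v (pvNbrs Adj v)
            (st.1.insert v (some u), st.2)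
          have h3 : pvNoneCount ((st.1.insert v (some u), st.2) : _ × List Int).1
              = pvNoneCount (st.1.insert v (some u)) := rfl
          omega
        rw [ih ((pvForA Adj f v (pvNbrs Adj v) (st.1.insert v (some u), st.2)).1,
            (pvForA Adj f v (pvNbrs Adj v) (st.1.insert v (some u), st.2)).2 ++ [v]) rest hq]
        rw [show pvForA Adj (f+1) u (v :: vs) st
            = pvForA Adj (f+1) u vs (pvVisitA Adj (f+1) v (st.1.insert v (some u), st.2)) by
          rw [pvForA, if_pos hc]]
        rw [show pvVisitA Adj (f+1) v (st.1.insert v (some u), st.2)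
            = ((pvForA Adj f v (pvNbrs Adj v) (st.1.insert v (some u), st.2)).1,
               (pvForA Adj f v (pvNbrs Adj v) (st.1.insert v (some u), st.2)).2 ++ [v]) by
          rw [pvVisitA]]
      · rw [pvLoopB, if_neg hc]
        rw [ih st rest h]
        rw [show pvForA Adj (f+1) u (v :: vs) st = pvForA Adj (f+1) u vs st by
          rw [pvForA, if_neg hc]]

theorem pvDfsEq (s : Int) (Adj : List (Int × List (Int × Int))) (parent : Option (List (Int × Option Int))) (order : Option (List Int)) :
    dfs s Adj parent order = dfs_alt s Adj parent order := by
  show (pvVisitA Adj (pvNoneCount (pvInit s Adj parent order).1 + 2) s (pvInit s Adj parent order)).2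
      = pvLoopB Adj (pvInit s Adj parent order).1 (pvInit s Adj parent order).2
          [(s, pvNbrs Adj s)]
  set st := pvInit s Adj parent order with hst
  rw [show pvNoneCount st.1 + 2 = (pvNoneCount st.1 + 1) + 1 from rfl]
  rw [pvVisitA]
  rw [pvSim Adj (pvNoneCount st.1 + 1) (pvNbrs Adj s) s st [] (by omega)]
  rw [pvLoopB]

-- ===== VERDICT (by name: the statement is the Claim_ definition above) =====
theorem dfs_spec : Claim_equal_dfs := by
  intro s Adj parent order _ _
  unfold Spec_dfs
  exact pvDfsEq s Adj parent order
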